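-- pv_equiv track=rewrite | github.com/laurensligthart/NestedRectangles | NestedRectangle.py | StochasticSubU
-- ===== SOURCE A (Python) =====
-- def CanonicalLabel(label):
--     """
--     Applies the symmetry relations to reduce a label to its canonical form.
--     """
--
--     canLab = [sorted(label[0]), sorted(label[1])]
--     return canLab
--
-- def StochasticSubU(label, coefficient, maxLoops=10):
--     """
--     Recursively removes all ill-defined variables with left-stochasticity for U
--     from the label representation of a variable.
--     """
--
--     #if u label is valid, just return the label
--     if all(x < 10 for x in label[0]):
--         return [label], [coefficient]
--
--     newLabels = []
--     coef = []
--
--     tempULabels = []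
--     tempUCoef = []
--
--     #check all u values
--     for i in range(len(label[0])):
--         if label[0][i] >= 10:
--
--             #create Id - sum_j u_jk
--             for j in range(1,4):
--                 newULabel = label[0]
--                 newULabel[i] -= 3
--                 tempULabels.append(CanonicalLabel([newULabel, label[1]]))
--                 tempUCoef.append(-coefficient)
--
--             newUlabel = label[0]
--             newUlabel[i] = 0
--             tempULabels.append(CanonicalLabel([newULabel, label[1]]))
--             tempUCoef.append(coefficient)
--
--             break #only one substitution at a time, recursiveness takes care of the rest
--
--     #check if newly created labels are valid, and if not, do the substitution again for each of them
--     for i in range(len(tempULabels)):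
--         if maxLoops > 0:
--             endLabels, endCoefs = StochasticSubU(tempULabels[i], tempUCoef[i], maxLoops-1)
--             newLabels += endLabels
--             coef += endCoefs
--         else:
--             raise RecursionError
--
--
--     return newLabels, coef
-- ===== SOURCE B (Python) =====
-- def _canon(row0, row1):
--     return [sorted(row0), sorted(row1)]
--
--
-- def _replace(row, i, w):
--     return row[:i] + [w] + row[i + 1:]
--
--
-- def StochasticSubU(label, coefficient, maxLoops=10):
--     """Iterative (explicit worklist) version: DFS with a stack of
--     (label, coefficient, remaining fuel) instead of recursion.
--     Does not mutate the caller's label (the original does)."""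
--     out_labels = []
--     out_coefs = []
--     stack = [(label, coefficient, maxLoops)]
--     while stack:
--         lab, coef, fuel = stack.pop()
--         row = lab[0]
--         if all(x < 10 for x in row):
--             out_labels.append(lab)
--             out_coefs.append(coef)
--             continue
--         if fuel <= 0:
--             raise RecursionError
--         i = next(k for k, x in enumerate(row) if x >= 10)
--         v = row[i]
--         rest = lab[1]
--         children = [
--             (_canon(_replace(row, i, v - 3), rest), -coef),
--             (_canon(_replace(row, i, v - 6), rest), -coef),
--             (_canon(_replace(row, i, v - 9), rest), -coef),
--             (_canon(_replace(row, i, 0), rest), coef),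
--         ]
--         for child_lab, child_coef in reversed(children):
--             stack.append((child_lab, child_coef, fuel - 1))
--     return out_labels, out_coefs
-- ===== Notes on version B (the rewrite author's own statement) =====
-- stated objective: alternative
-- what changed: The recursive DFS with per-call list concatenation is replaced by an explicit worklist loop: a stack of (label, coefficient, remaining-fuel) items popped in A's left-to-right DFS order, appending leaves to shared output lists, with the in-place -3/-6/-9/0 mutation cascade replaced by direct slice-built child rows.
import Mathlib
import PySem

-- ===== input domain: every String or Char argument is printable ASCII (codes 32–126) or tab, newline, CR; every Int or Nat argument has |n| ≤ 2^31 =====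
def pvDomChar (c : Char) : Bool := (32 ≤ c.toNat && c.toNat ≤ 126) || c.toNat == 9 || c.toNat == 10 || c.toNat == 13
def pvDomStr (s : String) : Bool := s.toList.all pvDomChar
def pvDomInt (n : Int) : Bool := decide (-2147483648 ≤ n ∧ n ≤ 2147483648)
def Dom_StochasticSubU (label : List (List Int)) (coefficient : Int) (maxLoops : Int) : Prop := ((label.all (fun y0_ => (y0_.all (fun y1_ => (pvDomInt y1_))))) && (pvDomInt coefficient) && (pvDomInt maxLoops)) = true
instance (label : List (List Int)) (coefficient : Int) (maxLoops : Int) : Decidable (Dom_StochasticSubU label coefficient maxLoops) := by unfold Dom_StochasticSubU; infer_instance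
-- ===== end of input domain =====

-- B replaces A's recursion by an explicit stack-based worklist (same DFS output order);
-- equivalence is about the RETURN value only: A mutates label[0] in place, B does not.

-- ===== PORT A =====
-- CanonicalLabel: [sorted(label[0]), sorted(label[1])]; A only calls it with 2-row
-- lists, where getD 0/1 is exact.
def canonicalLabelA (label : List (List Int)) : List (List Int) :=
  [PySem.List.sorted (label.getD 0 []) (fun x => x) false,
   PySem.List.sorted (label.getD 1 []) (fun x => x) false]

-- A's first loop: scan label[0] left to right for the first entry >= 10 and build the
-- four cascade labels (in-place -3 three times, then slot := 0) with their coefficients;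
-- `pending` is the unscanned tail of l0 and `i` the current index (range(len(label[0]))).
def scanBuildA (l0 l1 : List Int) (c : Int) (pending : List Int) (i : Nat) :
    List (List (List Int)) × List Int :=
  match pending with
  | [] => ([], [])
  | x :: rest =>
    if 10 ≤ x then
      -- newULabel aliases label[0]: each -= 3 reads the previously mutated list
      let r1 := l0.set i (l0.getD i 0 - 3)
      let r2 := r1.set i (r1.getD i 0 - 3)
      let r3 := r2.set i (r2.getD i 0 - 3)
      let r4 := r3.set i 0
      ([canonicalLabelA [r1, l1], canonicalLabelA [r2, l1],
        canonicalLabelA [r3, l1], canonicalLabelA [r4, l1]],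
       [-c, -c, -c, c])
    else scanBuildA l0 l1 c rest (i + 1)

mutual
-- label[0] / label[1] are read with getD; Python raises IndexError on too-short labels
-- (excluded by Pre_), and on the RecursionError path (maxLoops exhausted, also excluded
-- by Pre_) the port returns ([], []).
def StochasticSubU (label : List (List Int)) (coefficient : Int) (maxLoops : Int) :
    List (List (List Int)) × List Int :=
  let l0 := label.getD 0 []
  if l0.all (fun x => decide (x < 10)) then
    ([label], [coefficient])
  else
    let tmp := scanBuildA l0 (label.getD 1 []) coefficient l0 0
    subLoopA (tmp.1.zip tmp.2) maxLoops [] []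
termination_by (maxLoops.toNat, 1, 0)

-- A's second loop: newLabels += endLabels; coef += endCoefs, else raise
def subLoopA (pairs : List (List (List Int) × Int)) (m : Int)
    (accL : List (List (List Int))) (accC : List Int) :
    List (List (List Int)) × List Int :=
  match pairs with
  | [] => (accL, accC)
  | (l, c) :: rest =>
    if 0 < m then
      let r := StochasticSubU l c (m - 1)
      subLoopA rest m (accL ++ r.1) (accC ++ r.2)
    else ([], [])  -- raise RecursionError (excluded by Pre_)
termination_by (m.toNat, 0, pairs.length)
end

-- ===== PORT B =====
def canonB (r0 r1 : List Int) : List (List Int) :=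
  [PySem.List.sorted r0 (fun x => x) false, PySem.List.sorted r1 (fun x => x) false]

-- row[:i] + [w] + row[i+1:] for the natural-number index i used in Source B (exact there)
def replaceAt (row : List Int) (i : Nat) (w : Int) : List Int :=
  row.take i ++ [w] ++ row.drop (i + 1)

-- termination measure of the worklist: size of a full 4-ary tree of the item's fuel
def sizeT : Nat → Nat
  | 0 => 1
  | n + 1 => 1 + 4 * sizeT n

theorem sizeT_pos (n : Nat) : 0 < sizeT n := by
  cases n <;> simp [sizeT]

-- the while-stack loop of Source B; head of the list = top of the stack (pushing the four
-- children reversed and popping = prepending them in order)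
def goB (stack : List (List (List Int) × Int × Int))
    (outL : List (List (List Int))) (outC : List Int) :
    List (List (List Int)) × List Int :=
  match stack with
  | [] => (outL, outC)
  | (lab, coef, fuel) :: rest =>
    let row := lab.getD 0 []
    if row.all (fun x => decide (x < 10)) then
      goB rest (outL ++ [lab]) (outC ++ [coef])
    else if fuel ≤ 0 then ([], [])  -- raise RecursionError (excluded by Pre_)
    else
      let i := row.findIdx (fun x => decide (10 ≤ x))
      let v := row.getD i 0
      let r1 := lab.getD 1 []
      goB ((canonB (replaceAt row i (v - 3)) r1, -coef, fuel - 1) ::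
           (canonB (replaceAt row i (v - 6)) r1, -coef, fuel - 1) ::
           (canonB (replaceAt row i (v - 9)) r1, -coef, fuel - 1) ::
           (canonB (replaceAt row i 0) r1, coef, fuel - 1) :: rest) outL outC
termination_by (stack.map (fun it => sizeT it.2.2.toNat)).sum
decreasing_by
  · have := sizeT_pos fuel.toNat; simp; omega
  · simp
    have h1 : fuel.toNat = (fuel - 1).toNat + 1 := by omega
    rw [h1]; simp [sizeT]; omega

def StochasticSubU_alt (label : List (List Int)) (coefficient : Int) (maxLoops : Int) :
    List (List (List Int)) × List Int :=
  goB [(label, coefficient, maxLoops)] [] []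

-- ===== PRECONDITION & SPEC =====
-- fuel needed to eliminate one value v: 0 if v < 10, else ceil((v-9)/3) = (v-7) div 3
def dNeed (v : Int) : Nat := if v < 10 then 0 else (v - 7).toNat / 3
def fuelNeed (row : List Int) : Nat := (row.map dNeed).sum

-- Exactly the inputs on which the Python A returns: label nonempty (else IndexError on
-- label[0]); and when some u-value is >= 10, label has a second row (else IndexError in
-- CanonicalLabel) and maxLoops covers the substitution depth (else RecursionError).
def Pre_StochasticSubU (label : List (List Int)) (coefficient : Int) (maxLoops : Int) : Prop :=
  label ≠ [] ∧
    ((label.getD 0 []).all (fun x => decide (x < 10)) = true ∨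
      (2 ≤ label.length ∧ (fuelNeed (label.getD 0 []) : Int) ≤ maxLoops))
instance (label : List (List Int)) (coefficient : Int) (maxLoops : Int) :
    Decidable (Pre_StochasticSubU label coefficient maxLoops) := by
  unfold Pre_StochasticSubU; infer_instance

def pvWitness_StochasticSubU : List (List Int) × Int × Int := ([[11, 2], [0, 1]], 1, 3)

def Spec_StochasticSubU (label : List (List Int)) (coefficient : Int) (maxLoops : Int) (out : List (List (List Int)) × List Int) : Prop := out = StochasticSubU_alt label coefficient maxLoops
instance (label : List (List Int)) (coefficient : Int) (maxLoops : Int) (out : List (List (List Int)) × List Int) : Decidable (Spec_StochasticSubU label coefficient maxLoops out) := by unfold Spec_StochasticSubU; infer_instance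

-- ===== CLAIM (what is proved, stated in full; the proofs are below) =====
def Claim_equal_StochasticSubU : Prop := ∀ (label : List (List Int)) (coefficient : Int) (maxLoops : Int), Dom_StochasticSubU label coefficient maxLoops → Pre_StochasticSubU label coefficient maxLoops → Spec_StochasticSubU label coefficient maxLoops (StochasticSubU label coefficient maxLoops)

-- ===== LEMMAS AND PROOFS =====

theorem dNeed_pos {v : Int} (h : 10 ≤ v) : 1 ≤ dNeed v := by
  unfold dNeed; split <;> omega

theorem dNeed_sub3 {v : Int} (h : 10 ≤ v) : dNeed (v - 3) + 1 ≤ dNeed v := by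
  unfold dNeed; split_ifs <;> omega

theorem dNeed_sub6 {v : Int} (h : 10 ≤ v) : dNeed (v - 6) + 1 ≤ dNeed v := by
  unfold dNeed; split_ifs <;> omega

theorem dNeed_sub9 {v : Int} (h : 10 ≤ v) : dNeed (v - 9) + 1 ≤ dNeed v := by
  unfold dNeed; split_ifs <;> omega

theorem dNeed_zero : dNeed 0 = 0 := by unfold dNeed; norm_num

theorem fuelNeed_sorted (row : List Int) :
    fuelNeed (PySem.List.sorted row (fun x => x) false) = fuelNeed row := by
  unfold fuelNeed
  exact List.Perm.sum_eq (List.Perm.map dNeed (PySem.List.sorted_perm row (fun x => x) false))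

theorem fuelNeed_replace (row : List Int) (i : Nat) (w : Int) (h : i < row.length) :
    fuelNeed (replaceAt row i w) + dNeed row[i] = fuelNeed row + dNeed w := by
  unfold replaceAt fuelNeed
  have hh : i < (row.map dNeed).length := by simpa using h
  have e1 := List.sum_take_add_sum_drop (row.map dNeed) i
  have e2 : ((row.map dNeed).drop i).sum = dNeed row[i] + ((row.map dNeed).drop (i + 1)).sum := by
    rw [← List.getElem_cons_drop hh, List.sum_cons, List.getElem_map]
  simp [List.map_append]
  omega

theorem set_eq_replaceAt (row : List Int) (i : Nat) (w : Int) (h : i < row.length) :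
    row.set i w = replaceAt row i w := by
  unfold replaceAt
  rw [List.set_eq_take_append_cons_drop, if_pos h]
  simp

-- the sufficiency bound used by the main induction: each of the four child rows
-- needs strictly less fuel than the parent row
theorem fuelNeed_child (row : List Int) (i : Nat) (w : Int) (h : i < row.length)
    (hv : 10 ≤ row[i]) (hw : dNeed w + 1 ≤ dNeed row[i]) :
    fuelNeed (replaceAt row i w) + 1 ≤ fuelNeed row := by
  have := fuelNeed_replace row i w h
  omega

-- some element is ≥ 10 iff the `all (< 10)` test fails
theorem exists_ge10_of_not_all (row : List Int)
    (h : ¬ (row.all (fun x => decide (x < 10)) = true)) :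
    ∃ x ∈ row, 10 ≤ x := by
  simp [List.all_eq_true] at h
  obtain ⟨x, hx, hge⟩ := h
  exact ⟨x, hx, by omega⟩

theorem getD_set_self (l : List Int) (k : Nat) (h : k < l.length) (a : Int) :
    (l.set k a).getD k 0 = a := by
  rw [List.getD_eq_getElem?_getD, List.getElem?_set_self (by simpa using h)]; rfl

theorem getD_eq_getElem (l : List Int) (k : Nat) (h : k < l.length) :
    l.getD k 0 = l[k] := by
  rw [List.getD_eq_getElem?_getD, List.getElem?_eq_getElem h]; rfl

-- collapse A's in-place cascade into direct replacements
theorem cascade_eq (row : List Int) (k : Nat) (hk : k < row.length) :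
    (row.set k (row.getD k 0 - 3)) = replaceAt row k (row[k] - 3) ∧
    ((row.set k (row.getD k 0 - 3)).set k
        ((row.set k (row.getD k 0 - 3)).getD k 0 - 3)) = replaceAt row k (row[k] - 6) ∧
    (((row.set k (row.getD k 0 - 3)).set k
        ((row.set k (row.getD k 0 - 3)).getD k 0 - 3)).set k
          ((((row.set k (row.getD k 0 - 3)).set k
            ((row.set k (row.getD k 0 - 3)).getD k 0 - 3))).getD k 0 - 3)) =
      replaceAt row k (row[k] - 9) ∧
    ((((row.set k (row.getD k 0 - 3)).set k
        ((row.set k (row.getD k 0 - 3)).getD k 0 - 3)).set k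
          ((((row.set k (row.getD k 0 - 3)).set k
            ((row.set k (row.getD k 0 - 3)).getD k 0 - 3))).getD k 0 - 3)).set k 0) =
      replaceAt row k 0 := by
  have h0 := getD_eq_getElem row k hk
  refine ⟨?_, ?_, ?_, ?_⟩ <;>
    simp only [h0, getD_set_self row k hk, List.set_set] <;>
    rw [set_eq_replaceAt _ _ _ hk] <;>
    simp [replaceAt] <;> ring

theorem canonicalLabelA_pair (x y : List Int) : canonicalLabelA [x, y] = canonB x y := by
  simp [canonicalLabelA, canonB]

-- A's scan (over pending = l0.drop i, all earlier entries < 10) finds the same index as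
-- B's findIdx and produces exactly the four canonicalized children
theorem scanBuildA_eq (l0 l1 : List Int) (c : Int) :
    ∀ (pending : List Int) (i : Nat), pending = l0.drop i →
    (∃ x ∈ pending, 10 ≤ x) →
    (∀ (j : Nat) (hj : j < l0.length), j < i → l0[j] < 10) →
    ∃ (k : Nat) (hk : k < l0.length), 10 ≤ l0[k] ∧
      k = l0.findIdx (fun x => decide (10 ≤ x)) ∧
      scanBuildA l0 l1 c pending i =
        ([canonB (replaceAt l0 k (l0[k] - 3)) l1,
          canonB (replaceAt l0 k (l0[k] - 6)) l1,
          canonB (replaceAt l0 k (l0[k] - 9)) l1,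
          canonB (replaceAt l0 k 0) l1],
         [-c, -c, -c, c]) := by
  intro pending
  induction pending with
  | nil =>
    intro i _ hex _
    simp at hex
  | cons x rest ih =>
    intro i hdrop hex hpref
    have hi : i < l0.length := by
      by_contra hge
      have hnil : l0.drop i = [] := List.drop_eq_nil_iff.mpr (by omega)
      rw [hnil] at hdrop
      exact List.cons_ne_nil _ _ hdrop
    have hx : l0[i] = x := by
      have h1 := congrArg (fun l => l[0]?) hdrop
      simp only [List.getElem?_drop] at h1
      simpa [List.getElem?_eq_getElem hi] using h1.symm
    by_cases hge : 10 ≤ x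
    · refine ⟨i, hi, by rw [hx]; exact hge, ?_, ?_⟩
      · exact ((List.findIdx_eq hi).mpr
          ⟨by simp [hx, hge], fun j hj => by
            simp only [decide_eq_false_iff_not]
            exact not_le.mpr (hpref j (by omega) hj)⟩).symm
      · obtain ⟨e1, e2, e3, e4⟩ := cascade_eq l0 i hi
        rw [scanBuildA, if_pos hge]
        dsimp only
        rw [e4, e3, e2, e1]
        simp only [canonicalLabelA_pair]
    · have hrest : rest = l0.drop (i + 1) := by
        have h1 := congrArg (List.drop 1) hdrop
        simpa [List.drop_drop, Nat.add_comm] using h1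
      have hex' : ∃ y ∈ rest, 10 ≤ y := by
        obtain ⟨y, hy, h10⟩ := hex
        rcases List.mem_cons.mp hy with h | h
        · exact absurd (h ▸ h10) hge
        · exact ⟨y, h, h10⟩
      have hpref' : ∀ (j : Nat) (hj : j < l0.length), j < i + 1 → l0[j] < 10 := by
        intro j hj hji
        rcases Nat.lt_or_ge j i with h | h
        · exact hpref j hj h
        · have : j = i := by omega
          subst this
          rw [hx]; omega
      rw [show scanBuildA l0 l1 c (x :: rest) i = scanBuildA l0 l1 c rest (i + 1) from by
        rw [scanBuildA, if_neg hge]]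
      exact ih (i + 1) hrest hex' hpref'

theorem fuelNeed_pos (row : List Int) (x : Int) (hx : x ∈ row) (h10 : 10 ≤ x) :
    1 ≤ fuelNeed row := by
  induction row with
  | nil => cases hx
  | cons a t ih =>
    have he : fuelNeed (a :: t) = dNeed a + fuelNeed t := by simp [fuelNeed]
    rcases List.mem_cons.mp hx with h | h
    · have := dNeed_pos (h ▸ h10); omega
    · have := ih h; omega

-- the invariant under which one popped item contributes exactly A's result
def okLab (lab : List (List Int)) (m : Int) : Prop :=
  (lab.getD 0 []).all (fun x => decide (x < 10)) = true ∨
    (2 ≤ lab.length ∧ (fuelNeed (lab.getD 0 []) : Int) ≤ m)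

theorem okLab_child (l0 l1 : List Int) (k : Nat) (hk : k < l0.length)
    (h10 : 10 ≤ l0[k]) (m : Int) (hF : (fuelNeed l0 : Int) ≤ m) (w : Int)
    (hw : dNeed w + 1 ≤ dNeed l0[k]) : okLab (canonB (replaceAt l0 k w) l1) (m - 1) := by
  right
  refine ⟨by simp [canonB], ?_⟩
  have h1 : (canonB (replaceAt l0 k w) l1).getD 0 [] =
      PySem.List.sorted (replaceAt l0 k w) (fun x => x) false := by simp [canonB]
  rw [h1, fuelNeed_sorted]
  have := fuelNeed_child l0 k w hk h10 hw
  omega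

theorem subLoopA_cons (l : List (List Int)) (c : Int)
    (rest : List (List (List Int) × Int)) (m : Int) (hm : 0 < m)
    (accL : List (List (List Int))) (accC : List Int) :
    subLoopA ((l, c) :: rest) m accL accC =
      subLoopA rest m (accL ++ (StochasticSubU l c (m - 1)).1)
        (accC ++ (StochasticSubU l c (m - 1)).2) := by
  rw [subLoopA, if_pos hm]

theorem subLoopA_nil (m : Int) (accL : List (List (List Int))) (accC : List Int) :
    subLoopA [] m accL accC = (accL, accC) := by
  rw [subLoopA]

theorem A_base (lab : List (List Int)) (c m : Int)
    (hall : (lab.getD 0 []).all (fun x => decide (x < 10)) = true) :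
    StochasticSubU lab c m = ([lab], [c]) := by
  simp only [StochasticSubU]
  rw [if_pos hall]

-- one expansion step of A, rewritten through scanBuildA_eq and the subLoopA unfolding
theorem A_step (lab : List (List Int)) (c m : Int)
    (hall : ¬ ((lab.getD 0 []).all (fun x => decide (x < 10)) = true)) (hm : 0 < m) :
    ∃ (k : Nat) (hk : k < (lab.getD 0 []).length),
      10 ≤ (lab.getD 0 [])[k] ∧
      k = (lab.getD 0 []).findIdx (fun x => decide (10 ≤ x)) ∧
      StochasticSubU lab c m =
        ((StochasticSubU (canonB (replaceAt (lab.getD 0 []) k ((lab.getD 0 [])[k] - 3)) (lab.getD 1 [])) (-c) (m - 1)).1 ++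
         ((StochasticSubU (canonB (replaceAt (lab.getD 0 []) k ((lab.getD 0 [])[k] - 6)) (lab.getD 1 [])) (-c) (m - 1)).1 ++
          ((StochasticSubU (canonB (replaceAt (lab.getD 0 []) k ((lab.getD 0 [])[k] - 9)) (lab.getD 1 [])) (-c) (m - 1)).1 ++
           (StochasticSubU (canonB (replaceAt (lab.getD 0 []) k 0) (lab.getD 1 [])) c (m - 1)).1)),
         (StochasticSubU (canonB (replaceAt (lab.getD 0 []) k ((lab.getD 0 [])[k] - 3)) (lab.getD 1 [])) (-c) (m - 1)).2 ++
         ((StochasticSubU (canonB (replaceAt (lab.getD 0 []) k ((lab.getD 0 [])[k] - 6)) (lab.getD 1 [])) (-c) (m - 1)).2 ++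
          ((StochasticSubU (canonB (replaceAt (lab.getD 0 []) k ((lab.getD 0 [])[k] - 9)) (lab.getD 1 [])) (-c) (m - 1)).2 ++
           (StochasticSubU (canonB (replaceAt (lab.getD 0 []) k 0) (lab.getD 1 [])) c (m - 1)).2))) := by
  obtain ⟨x, hxm, hx10⟩ := exists_ge10_of_not_all _ hall
  obtain ⟨k, hk, h10, hkf, hscan⟩ := scanBuildA_eq (lab.getD 0 []) (lab.getD 1 []) c
    (lab.getD 0 []) 0 (by simp) ⟨x, hxm, hx10⟩ (by omega)
  refine ⟨k, hk, h10, hkf, ?_⟩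
  conv_lhs => rw [StochasticSubU]
  dsimp only
  rw [if_neg hall]
  rw [hscan]
  simp only [List.zip_cons_cons, List.zip_nil_right]
  rw [subLoopA_cons _ _ _ _ hm, subLoopA_cons _ _ _ _ hm, subLoopA_cons _ _ _ _ hm,
      subLoopA_cons _ _ _ _ hm, subLoopA_nil]
  simp [List.append_assoc]

theorem goB_base (lab : List (List Int)) (c m : Int)
    (rest : List (List (List Int) × Int × Int)) (outL : List (List (List Int))) (outC : List Int)
    (hall : (lab.getD 0 []).all (fun x => decide (x < 10)) = true) :
    goB ((lab, c, m) :: rest) outL outC = goB rest (outL ++ [lab]) (outC ++ [c]) := by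
  conv_lhs => rw [goB]
  dsimp only
  rw [if_pos hall]

theorem goB_step : ∀ (n : Nat) (lab : List (List Int)) (c m : Int), m.toNat ≤ n →
    okLab lab m → ∀ rest outL outC,
    goB ((lab, c, m) :: rest) outL outC =
      goB rest (outL ++ (StochasticSubU lab c m).1) (outC ++ (StochasticSubU lab c m).2) := by
  intro n
  induction n with
  | zero =>
    intro lab c m hm hok rest outL outC
    by_cases hall : (lab.getD 0 []).all (fun x => decide (x < 10)) = true
    · rw [A_base lab c m hall, goB_base lab c m rest outL outC hall]
    · exfalso
      obtain ⟨_, hF⟩ := hok.resolve_left hall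
      obtain ⟨x, hxm, hx10⟩ := exists_ge10_of_not_all _ hall
      have := fuelNeed_pos _ x hxm hx10
      omega
  | succ n ih =>
    intro lab c m hm hok rest outL outC
    by_cases hall : (lab.getD 0 []).all (fun x => decide (x < 10)) = true
    · rw [A_base lab c m hall, goB_base lab c m rest outL outC hall]
    · obtain ⟨hlen, hF⟩ := hok.resolve_left hall
      obtain ⟨x, hxm, hx10⟩ := exists_ge10_of_not_all _ hall
      have hFpos := fuelNeed_pos _ x hxm hx10
      have hm0 : 0 < m := by omega
      obtain ⟨k, hk, h10, hkf, hA⟩ := A_step lab c m hall hm0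
      have hm' : (m - 1).toNat ≤ n := by omega
      have ok3 := okLab_child _ (lab.getD 1 []) k hk h10 m hF _ (dNeed_sub3 h10)
      have ok6 := okLab_child _ (lab.getD 1 []) k hk h10 m hF _ (dNeed_sub6 h10)
      have ok9 := okLab_child _ (lab.getD 1 []) k hk h10 m hF _ (dNeed_sub9 h10)
      have ok0 := okLab_child _ (lab.getD 1 []) k hk h10 m hF 0
        (by have := dNeed_pos h10; rw [dNeed_zero]; omega)
      conv_lhs => rw [goB]
      dsimp only
      rw [if_neg hall, if_neg (by omega : ¬ m ≤ 0)]
      rw [← hkf, getD_eq_getElem _ k hk]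
      rw [ih _ _ _ hm' ok3, ih _ _ _ hm' ok6, ih _ _ _ hm' ok9, ih _ _ _ hm' ok0]
      rw [hA]
      simp [List.append_assoc]

-- ===== VERDICT (by name: the statement is the Claim_ definition above) =====
theorem StochasticSubU_spec : Claim_equal_StochasticSubU := by
  intro label coefficient maxLoops _ hpre
  unfold Spec_StochasticSubU StochasticSubU_alt
  rw [goB_step maxLoops.toNat label coefficient maxLoops le_rfl hpre.2 [] [] []]
  simp [goB]
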